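-- pv_equiv track=rewrite | github.com/zaza1barbakadze/GOA-homeworks | level 79/homework/hw.py | closest_leap_year
-- ===== SOURCE A (Python) =====
-- def is_leap_year(year):
--     if (year % 4 == 0 and year % 100 != 0) or (year % 400 == 0):
--         return True
--     return False
--
-- def closest_leap_year(year):
--     next_year = year + 1
--     prev_year = year - 1
--
--     while not is_leap_year(next_year):
--         next_year += 1
--
--     while not is_leap_year(prev_year):
--         prev_year -= 1
--
--     if abs(next_year - year) < abs(prev_year - year):
--         return next_year
--     return prev_year
-- ===== SOURCE B (Python) =====
-- def is_leap_year(year):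
--     if (year % 4 == 0 and year % 100 != 0) or (year % 400 == 0):
--         return True
--     return False
--
-- def closest_leap_year(year):
--     d = 1
--     while True:
--         if is_leap_year(year - d):
--             return year - d
--         if is_leap_year(year + d):
--             return year + d
--         d += 1
-- ===== Notes on version B (the rewrite author's own statement) =====
-- stated objective: alternative
-- what changed: Replaces the two independent directional while-loops plus an abs-comparison with a single outward-expanding search over a growing offset, testing the earlier candidate year before the later one at each distance so ties break to the earlier year; only one counter is maintained and no final comparison is needed.
import Mathlib
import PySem

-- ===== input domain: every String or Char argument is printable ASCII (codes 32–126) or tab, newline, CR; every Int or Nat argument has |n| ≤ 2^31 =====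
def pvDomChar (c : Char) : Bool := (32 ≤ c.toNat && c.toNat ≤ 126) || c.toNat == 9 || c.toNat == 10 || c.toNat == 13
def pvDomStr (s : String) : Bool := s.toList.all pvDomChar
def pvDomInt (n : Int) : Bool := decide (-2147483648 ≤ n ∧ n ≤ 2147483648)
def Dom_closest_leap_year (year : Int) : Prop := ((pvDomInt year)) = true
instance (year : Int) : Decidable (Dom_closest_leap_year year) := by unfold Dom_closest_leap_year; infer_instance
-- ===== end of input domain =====

-- B replaces A's two directional while-loops and abs-comparison with one outward-expanding
-- search over the offset d (checking year-d before year+d); alternative decomposition, same cost.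


-- ===== PORT A =====
-- is_leap_year, transliterated (Python % with positive divisor = PySem.Int.mod)
def is_leap_year (year : Int) : Bool :=
  if (PySem.Int.mod year 4 == 0 && PySem.Int.mod year 100 != 0) || (PySem.Int.mod year 400 == 0)
  then true else false

-- 'while not is_leap_year(next_year): next_year += 1' — fuel only makes the loop total;
-- a leap year always lies within 8 steps of the start, so fuel 9 is never exhausted.
def clyUp (y : Int) : Nat → Int
  | 0 => y
  | n + 1 => if is_leap_year y then y else clyUp (y + 1) n

def clyDown (y : Int) : Nat → Int
  | 0 => y
  | n + 1 => if is_leap_year y then y else clyDown (y - 1) n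

def closest_leap_year (year : Int) : Int :=
  let next_year := clyUp (year + 1) 9
  let prev_year := clyDown (year - 1) 9
  if |next_year - year| < |prev_year - year| then next_year else prev_year

-- ===== PORT B =====
-- 'while True: check year-d, then year+d, d += 1' — same fuel-totalisation remark as above.
def clyGo (year : Int) (d : Int) : Nat → Int
  | 0 => year
  | n + 1 =>
    if is_leap_year (year - d) then year - d
    else if is_leap_year (year + d) then year + d
    else clyGo year (d + 1) n

def closest_leap_year_alt (year : Int) : Int := clyGo year 1 9

-- ===== PRECONDITION & SPEC =====
def Spec_closest_leap_year (year : Int) (out : Int) : Prop := out = closest_leap_year_alt year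
instance (year : Int) (out : Int) : Decidable (Spec_closest_leap_year year out) := by unfold Spec_closest_leap_year; infer_instance

-- ===== CLAIM (what is proved, stated in full; the proofs are below) =====
def Claim_equal_closest_leap_year : Prop := ∀ (year : Int), Dom_closest_leap_year year → Spec_closest_leap_year year (closest_leap_year year)

-- ===== LEMMAS AND PROOFS =====

theorem is_leap_shift (y m : Int) : is_leap_year (y + 400 * m) = is_leap_year y := by
  have d4 : (4 ∣ y + 400 * m) ↔ (4 ∣ y) := by omega
  have d100 : (100 ∣ y + 400 * m) ↔ (100 ∣ y) := by omega
  have d400 : (400 ∣ y + 400 * m) ↔ (400 ∣ y) := by omega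
  simp [is_leap_year, PySem.Int.mod_eq_zero_iff_dvd, d4, d100, d400]

theorem clyUp_shift (f : Nat) (y m : Int) : clyUp (y + 400 * m) f = clyUp y f + 400 * m := by
  induction f generalizing y with
  | zero => simp [clyUp]
  | succ n ih =>
    simp only [clyUp, is_leap_shift]
    by_cases h : is_leap_year y
    · simp [h]
    · have e : y + 400 * m + 1 = (y + 1) + 400 * m := by ring
      simp [h, e, ih]

theorem clyDown_shift (f : Nat) (y m : Int) : clyDown (y + 400 * m) f = clyDown y f + 400 * m := by
  induction f generalizing y with
  | zero => simp [clyDown]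
  | succ n ih =>
    simp only [clyDown, is_leap_shift]
    by_cases h : is_leap_year y
    · simp [h]
    · have e : y + 400 * m - 1 = (y - 1) + 400 * m := by ring
      simp [h, e, ih]

theorem clyGo_shift (f : Nat) (y d m : Int) : clyGo (y + 400 * m) d f = clyGo y d f + 400 * m := by
  induction f generalizing d with
  | zero => simp [clyGo]
  | succ n ih =>
    have hsub : y + 400 * m - d = (y - d) + 400 * m := by ring
    have hadd : y + 400 * m + d = (y + d) + 400 * m := by ring
    simp only [clyGo, hsub, hadd, is_leap_shift]
    by_cases h1 : is_leap_year (y - d)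
    · simp [h1]
    · by_cases h2 : is_leap_year (y + d)
      · simp [h1, h2]
      · simp [h1, h2, ih]

theorem A_shift (y m : Int) : closest_leap_year (y + 400 * m) = closest_leap_year y + 400 * m := by
  simp only [closest_leap_year]
  have hu : y + 400 * m + 1 = (y + 1) + 400 * m := by ring
  have hd : y + 400 * m - 1 = (y - 1) + 400 * m := by ring
  rw [hu, hd, clyUp_shift, clyDown_shift]
  have e1 : clyUp (y + 1) 9 + 400 * m - (y + 400 * m) = clyUp (y + 1) 9 - y := by ring
  have e2 : clyDown (y - 1) 9 + 400 * m - (y + 400 * m) = clyDown (y - 1) 9 - y := by ring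
  rw [e1, e2]
  split <;> rfl

theorem B_shift (y m : Int) : closest_leap_year_alt (y + 400 * m) = closest_leap_year_alt y + 400 * m := by
  simp only [closest_leap_year_alt, clyGo_shift]

set_option maxRecDepth 40000 in
theorem base_case : ∀ n : Fin 400, closest_leap_year (n : Int) = closest_leap_year_alt (n : Int) := by decide

-- ===== VERDICT (by name: the statement is the Claim_ definition above) =====
theorem closest_leap_year_spec : Claim_equal_closest_leap_year := by
  intro year _
  unfold Spec_closest_leap_year
  have h0 : (0:Int) < 400 := by norm_num
  have hr0 : 0 ≤ year % 400 := Int.emod_nonneg year (by norm_num)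
  have hr1 : year % 400 < 400 := Int.emod_lt_of_pos year h0
  have hy : year = year % 400 + 400 * (year / 400) := by omega
  have hb : closest_leap_year (year % 400) = closest_leap_year_alt (year % 400) := by
    have hn : (year % 400).toNat < 400 := by omega
    have := base_case ⟨(year % 400).toNat, hn⟩
    simpa [Int.toNat_of_nonneg hr0] using this
  rw [hy, A_shift, B_shift, hb]
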